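-- pv_equiv track=rewrite | github.com/xxmalcala/TIdeS | bin/save_preds.py | filter_tides_preds
-- ===== SOURCE A (Python) =====
-- from collections import defaultdict
--
-- def filter_tides_preds(ref_dict: dict, imp_orfs: list) -> list:
--     tmp_dict = defaultdict(list)
--     top_orfs = []
--
--     for k, v in ref_dict.items():
--         if k in imp_orfs:
--             tmp_dict[k.split('.pORF')[0]].append(v)
--
--     for k, v in tmp_dict.items():
--         if len(v) > 1:
--             maxlen = max([len(i) for i in v])
--             top_orfs += [i for i in v if len(i) == maxlen]
--
--         else:
--             top_orfs += v
--
--     return top_orfs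
-- ===== SOURCE B (Python) =====
-- def filter_tides_preds(ref_dict: dict, imp_orfs: list) -> list:
--     best = {}  # gene -> (best_len, list of ORFs attaining it, in order)
--     for k, v in ref_dict.items():
--         if k in imp_orfs:
--             gene = k.split('.pORF')[0]
--             entry = best.get(gene)
--             if entry is None:
--                 best[gene] = (len(v), [v])
--             else:
--                 blen, lst = entry
--                 if len(v) > blen:
--                     best[gene] = (len(v), [v])
--                 elif len(v) == blen:
--                     lst.append(v)
--     out = []
--     for _blen, lst in best.values():
--         out += lst
--     return out
-- ===== Notes on version B (the rewrite author's own statement) =====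
-- stated objective: alternative
-- what changed: Single pass that keeps a running (best_len, tied-ORFs) pair per gene instead of collecting full per-gene groups and rescanning each group twice for its maximum length.
import Mathlib
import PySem

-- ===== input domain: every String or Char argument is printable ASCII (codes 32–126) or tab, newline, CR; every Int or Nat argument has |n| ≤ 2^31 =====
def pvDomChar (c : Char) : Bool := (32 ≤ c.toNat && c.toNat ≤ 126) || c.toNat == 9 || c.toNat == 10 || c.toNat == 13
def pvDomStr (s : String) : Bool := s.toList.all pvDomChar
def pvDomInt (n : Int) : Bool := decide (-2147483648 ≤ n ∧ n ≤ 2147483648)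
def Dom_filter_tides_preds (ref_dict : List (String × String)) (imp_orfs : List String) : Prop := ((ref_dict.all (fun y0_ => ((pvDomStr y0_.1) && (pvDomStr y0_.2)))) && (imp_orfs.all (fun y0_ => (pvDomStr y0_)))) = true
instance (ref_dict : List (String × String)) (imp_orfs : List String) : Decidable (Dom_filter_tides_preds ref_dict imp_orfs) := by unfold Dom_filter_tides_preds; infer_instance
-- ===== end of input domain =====

-- B keeps a running per-gene maximum in one pass instead of grouping all ORFs per gene
-- and rescanning each group for its maximal length (objective: alternative decomposition).

-- ===== PORT A =====
-- k.split('.pORF')[0]; split? is `some` (sep ≠ "") and nonempty, so both defaults are unreachable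
def geneOf (k : String) : String :=
  PySem.List.pyGetD ((PySem.Str.split? k ".pORF").getD []) 0 ""

def filter_tides_preds (ref_dict : List (String × String)) (imp_orfs : List String) : List String :=
  let tmp_dict := ref_dict.foldl
    (fun (d : PySem.Dict String (List String)) kv =>
      if imp_orfs.contains kv.1 then d.modify (geneOf kv.1) [] (· ++ [kv.2]) else d)
    PySem.Dict.empty
  tmp_dict.items.foldl
    (fun top gv =>
      if 1 < gv.2.length then
        top ++ gv.2.filter (fun i => PySem.Str.len i == (PySem.List.max? (gv.2.map PySem.Str.len) id).getD 0)
      else top ++ gv.2)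
    []

-- ===== PORT B =====
def filter_tides_preds_alt (ref_dict : List (String × String)) (imp_orfs : List String) : List String :=
  let best := ref_dict.foldl
    (fun (d : PySem.Dict String (Int × List String)) kv =>
      if imp_orfs.contains kv.1 then
        match d.get? (geneOf kv.1) with
        | none => d.insert (geneOf kv.1) (PySem.Str.len kv.2, [kv.2])
        | some e =>
          if e.1 < PySem.Str.len kv.2 then d.insert (geneOf kv.1) (PySem.Str.len kv.2, [kv.2])
          else if PySem.Str.len kv.2 == e.1 then d.insert (geneOf kv.1) (e.1, e.2 ++ [kv.2])
          else d
      else d)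
    PySem.Dict.empty
  best.values.foldl (fun out p => out ++ p.2) []

-- ===== PRECONDITION & SPEC =====
def Spec_filter_tides_preds (ref_dict : List (String × String)) (imp_orfs : List String) (out : List String) : Prop := out = filter_tides_preds_alt ref_dict imp_orfs
instance (ref_dict : List (String × String)) (imp_orfs : List String) (out : List String) : Decidable (Spec_filter_tides_preds ref_dict imp_orfs out) := by unfold Spec_filter_tides_preds; infer_instance

-- ===== CLAIM (what is proved, stated in full; the proofs are below) =====
def Claim_equal_filter_tides_preds : Prop := ∀ (ref_dict : List (String × String)) (imp_orfs : List String), Dom_filter_tides_preds ref_dict imp_orfs → Spec_filter_tides_preds ref_dict imp_orfs (filter_tides_preds ref_dict imp_orfs)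

-- ===== LEMMAS AND PROOFS =====

-- B's dict entry for a gene is `keepMax` of A's accumulated list for that gene.
def keepMax (lst : List String) : Int × List String :=
  (((PySem.List.max? (lst.map PySem.Str.len) id).getD 0),
   lst.filter (fun i => PySem.Str.len i == (PySem.List.max? (lst.map PySem.Str.len) id).getD 0))

def pvF (p : String × List String) : String × (Int × List String) := (p.1, keepMax p.2)

def pvMaxStep (acc : Option Int) (y : Int) : Option Int :=
  match acc with
  | none => some y
  | some m => if m < y then some y else some m

lemma max?_eq_pvFold (l : List Int) : PySem.List.max? l id = l.foldl pvMaxStep none := by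
  unfold PySem.List.max?
  apply PySem.List.foldl_congr_mem
  intro acc x _
  cases acc <;> rfl

lemma pvFold_some_isSome (l : List Int) (m : Int) : (l.foldl pvMaxStep (some m)).isSome := by
  induction l generalizing m with
  | nil => rfl
  | cons x t ih =>
    show (t.foldl pvMaxStep (if m < x then some x else some m)).isSome
    by_cases h : m < x
    · rw [if_pos h]; exact ih _
    · rw [if_neg h]; exact ih _

lemma max?_cons_isSome (x : String) (t : List String) :
    (PySem.List.max? ((x :: t).map PySem.Str.len) id).isSome := by
  rw [max?_eq_pvFold]
  simp only [List.map_cons, List.foldl_cons]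
  show ((t.map PySem.Str.len).foldl pvMaxStep (some (PySem.Str.len x))).isSome
  exact pvFold_some_isSome _ _

lemma max?_append_singleton (l : List Int) (x : Int) :
    PySem.List.max? (l ++ [x]) id = some (match PySem.List.max? l id with
      | none => x
      | some m => if m < x then x else m) := by
  rw [max?_eq_pvFold, max?_eq_pvFold, List.foldl_append]
  rcases hr : l.foldl pvMaxStep none with _ | m
  · rfl
  · show pvMaxStep (some m) x = some (if m < x then x else m)
    by_cases h : m < x
    · show (if m < x then some x else some m) = _
      rw [if_pos h, if_pos h]
    · show (if m < x then some x else some m) = _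
      rw [if_neg h, if_neg h]

lemma keepMax_append (lst : List String) (v : String) :
    keepMax (lst ++ [v]) =
      if (keepMax lst).1 < PySem.Str.len v then (PySem.Str.len v, [v])
      else if PySem.Str.len v == (keepMax lst).1 then ((keepMax lst).1, (keepMax lst).2 ++ [v])
      else keepMax lst := by
  have hv0 : (0:Int) ≤ PySem.Str.len v := by simp [PySem.Str.len_eq]
  rcases hm : PySem.List.max? (lst.map PySem.Str.len) id with _ | m
  · -- lst = []
    have hl : lst = [] := by
      cases lst with
      | nil => rfl
      | cons x t =>
        exfalso
        have hs := max?_cons_isSome x t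
        rw [hm] at hs
        simp at hs
    subst hl
    have hk0 : keepMax ([] : List String) = (0, []) := rfl
    have hk1 : keepMax [v] = (PySem.Str.len v, [v]) := by
      simp [keepMax, PySem.List.max?]
    rw [List.nil_append, hk0, hk1]
    rcases lt_or_eq_of_le hv0 with h1 | h1
    · rw [if_pos h1]
    · rw [← h1]
      simp
  · have hmax : ∀ i ∈ lst, PySem.Str.len i ≤ m := by
      intro i hi
      exact PySem.List.max?_isMax (xs := lst.map PySem.Str.len) (key := id) (m := m) hm _
        (List.mem_map_of_mem hi)
    have hK : keepMax lst = (m, lst.filter (fun i => PySem.Str.len i == m)) := by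
      simp [keepMax, hm]
    rw [hK]
    have hstep : PySem.List.max? (lst.map PySem.Str.len ++ [PySem.Str.len v]) id
        = some (if m < PySem.Str.len v then PySem.Str.len v else m) := by
      rw [max?_append_singleton, hm]
    simp only [PySem.Str.len_eq, String.length_toList] at hstep hmax
    by_cases h1 : m < (v.length : Int)
    · rw [if_pos h1] at hstep
      have hnil : lst.filter (fun i => ((i.length : Int) == (v.length : Int))) = [] := by
        rw [List.filter_eq_nil_iff]
        intro i hi
        simp only [beq_iff_eq]
        exact ne_of_lt (lt_of_le_of_lt (hmax i hi) h1)
      simp [keepMax, List.filter_append, hstep, hnil, h1]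
    · rw [if_neg h1] at hstep
      by_cases h2 : ((v.length : Int)) = m
      · rw [h2] at hstep
        simp [keepMax, List.filter_append, hstep, h1, h2]
      · simp [keepMax, List.filter_append, hstep, h1, h2]

lemma get?_rel (dA : PySem.Dict String (List String)) (dB : PySem.Dict String (Int × List String))
    (h : dB.items = dA.items.map pvF) (g : String) :
    dB.get? g = (dA.get? g).map keepMax := by
  simp only [PySem.Dict.get?, h, List.find?_map]
  have hc : (fun (p : String × (Int × List String)) => p.1 == g) ∘ pvF = (fun p => p.1 == g) := by
    funext p; rfl
  rw [hc]
  cases List.find? (fun p => p.1 == g) dA.items <;> simp [pvF]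

lemma contains_rel (dA : PySem.Dict String (List String)) (dB : PySem.Dict String (Int × List String))
    (h : dB.items = dA.items.map pvF) (g : String) :
    dB.contains g = dA.contains g := by
  simp only [PySem.Dict.contains, h, List.any_map]
  rfl

lemma step_rel (imp_orfs : List String) (kv : String × String)
    (dA : PySem.Dict String (List String)) (dB : PySem.Dict String (Int × List String))
    (hnd : dA.keys.Nodup) (h : dB.items = dA.items.map pvF) :
    ((if imp_orfs.contains kv.1 then
        match dB.get? (geneOf kv.1) with
        | none => dB.insert (geneOf kv.1) (PySem.Str.len kv.2, [kv.2])
        | some e =>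
          if e.1 < PySem.Str.len kv.2 then dB.insert (geneOf kv.1) (PySem.Str.len kv.2, [kv.2])
          else if PySem.Str.len kv.2 == e.1 then dB.insert (geneOf kv.1) (e.1, e.2 ++ [kv.2])
          else dB
      else dB)).items =
    ((if imp_orfs.contains kv.1 then dA.modify (geneOf kv.1) [] (· ++ [kv.2]) else dA)).items.map pvF := by
  by_cases himp : imp_orfs.contains kv.1
  · rw [if_pos himp, if_pos himp]
    set g := geneOf kv.1 with hg
    set v := kv.2 with hv
    have hget := get?_rel dA dB h g
    rcases hA : dA.get? g with _ | lst
    · rw [hA] at hget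
      simp only [hget, Option.map_none]
      have hcA : dA.contains g = false := (PySem.Dict.get?_eq_none_iff_contains dA g).1 hA
      have hcB : dB.contains g = false := by rw [contains_rel dA dB h g]; exact hcA
      simp only [PySem.Dict.modify, PySem.Dict.getD, hA, Option.getD_none]
      rw [PySem.Dict.items_insert_of_not_contains _ _ hcA, PySem.Dict.items_insert_of_not_contains _ _ hcB]
      rw [h, List.map_append]
      simp [pvF, keepMax, PySem.List.max?]
    · rw [hA] at hget
      simp only [hget, Option.map_some]
      have hcA : dA.contains g = true := by
        rw [PySem.Dict.contains_eq_isSome_get?, hA]; rfl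
      have hcB : dB.contains g = true := by rw [contains_rel dA dB h g]; exact hcA
      have hval : ∀ p ∈ dA.items, (p.1 == g) = true → p.2 = lst := by
        intro p hp hpg
        have hpe : p.1 = g := by simpa using hpg
        have hmem : (g, p.2) ∈ dA.items := by rw [← hpe]; exact hp
        have := (PySem.Dict.get?_eq_some_iff_mem_items dA g p.2 hnd).2 hmem
        rw [hA] at this
        exact (Option.some_injective _ this.symm)
      simp only [PySem.Dict.modify, PySem.Dict.getD, hA, Option.getD_some]
      rw [PySem.Dict.items_insert_of_contains _ _ hcA]
      have hk := keepMax_append lst v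
      by_cases h1 : (keepMax lst).1 < PySem.Str.len v
      · rw [if_pos h1] at hk
        rw [if_pos h1]
        rw [PySem.Dict.items_insert_of_contains _ _ hcB, h]
        simp only [List.map_map]
        refine List.map_congr_left ?_
        intro p hp
        by_cases hpg : (p.1 == g) = true
        · simp only [Function.comp, pvF, hpg, if_true, hval p hp hpg, hk]
        · simp only [Function.comp, pvF, hpg, if_false]
          simp at hpg
          simp [hpg]
      · by_cases h2 : (PySem.Str.len v == (keepMax lst).1) = true
        · rw [if_neg h1, if_pos h2] at hk
          rw [if_neg h1, if_pos h2]
          rw [PySem.Dict.items_insert_of_contains _ _ hcB, h]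
          simp only [List.map_map]
          refine List.map_congr_left ?_
          intro p hp
          by_cases hpg : (p.1 == g) = true
          · simp only [Function.comp, pvF, hpg, if_true, hval p hp hpg, hk]
          · simp only [Function.comp, pvF, hpg, if_false]
            simp at hpg
            simp [hpg]
        · rw [if_neg h1, if_neg (by simpa using h2)] at hk
          rw [if_neg h1, if_neg h2]
          rw [h, List.map_map]
          refine List.map_congr_left ?_
          intro p hp
          by_cases hpg : (p.1 == g) = true
          · have hpe : p.1 = g := by simpa using hpg
            simp [Function.comp, pvF, hpg, hval p hp hpg, hk, hpe]
          · simp [Function.comp, pvF, hpg]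
  · rw [if_neg himp, if_neg himp]
    exact h

lemma nodup_step (imp_orfs : List String) (kv : String × String)
    (dA : PySem.Dict String (List String)) (hnd : dA.keys.Nodup) :
    ((if imp_orfs.contains kv.1 then dA.modify (geneOf kv.1) [] (· ++ [kv.2]) else dA)).keys.Nodup := by
  by_cases himp : imp_orfs.contains kv.1
  · rw [if_pos himp]
    simp only [PySem.Dict.modify]
    exact PySem.Dict.nodup_keys_insert _ _ _ hnd
  · rw [if_neg himp]
    exact hnd

lemma loop_rel (imp_orfs : List String) (l : List (String × String))
    (dA : PySem.Dict String (List String)) (dB : PySem.Dict String (Int × List String))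
    (hnd : dA.keys.Nodup) (h : dB.items = dA.items.map pvF) :
    (l.foldl (fun d kv =>
      if imp_orfs.contains kv.1 then
        match d.get? (geneOf kv.1) with
        | none => d.insert (geneOf kv.1) (PySem.Str.len kv.2, [kv.2])
        | some e =>
          if e.1 < PySem.Str.len kv.2 then d.insert (geneOf kv.1) (PySem.Str.len kv.2, [kv.2])
          else if PySem.Str.len kv.2 == e.1 then d.insert (geneOf kv.1) (e.1, e.2 ++ [kv.2])
          else d
      else d) dB).items =
    (l.foldl (fun d kv =>
      if imp_orfs.contains kv.1 then d.modify (geneOf kv.1) [] (· ++ [kv.2]) else d) dA).items.map pvF := by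
  induction l generalizing dA dB with
  | nil => simpa using h
  | cons kv l ih =>
    simp only [List.foldl_cons]
    exact ih _ _ (nodup_step imp_orfs kv dA hnd) (step_rel imp_orfs kv dA dB hnd h)

lemma entry_out (lst : List String) :
    (keepMax lst).2 =
      if 1 < lst.length then
        lst.filter (fun i => PySem.Str.len i == (PySem.List.max? (lst.map PySem.Str.len) id).getD 0)
      else lst := by
  cases lst with
  | nil => simp [keepMax]
  | cons x t =>
    cases t with
    | nil => simp [keepMax, PySem.List.max?]
    | cons y t => simp [keepMax]

lemma out_rel (L : List (String × List String)) (acc : List String) :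
    L.foldl (fun out p => out ++ (keepMax p.2).2) acc =
    L.foldl (fun top gv =>
      if 1 < gv.2.length then
        top ++ gv.2.filter (fun i => PySem.Str.len i == (PySem.List.max? (gv.2.map PySem.Str.len) id).getD 0)
      else top ++ gv.2) acc := by
  induction L generalizing acc with
  | nil => rfl
  | cons p L ih =>
    simp only [List.foldl_cons]
    rw [← ih]
    congr 1
    rw [entry_out p.2]
    split <;> rfl

-- ===== VERDICT (by name: the statement is the Claim_ definition above) =====
theorem filter_tides_preds_spec : Claim_equal_filter_tides_preds := by
  intro ref_dict imp_orfs _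
  unfold Spec_filter_tides_preds filter_tides_preds filter_tides_preds_alt
  have hrel := loop_rel imp_orfs ref_dict PySem.Dict.empty PySem.Dict.empty
    PySem.Dict.nodup_keys_empty rfl
  simp only [PySem.Dict.values]
  rw [hrel]
  simp only [List.foldl_map]
  exact (out_rel _ _).symm
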